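-- pv_equiv track=rewrite | github.com/iofu728/ProgrammingCode | work/20A/1.py | get_2_3
-- ===== SOURCE A (Python) =====
-- def get_2_3(tt):
--     ta = [int(ii >= 2) for ii in tt]
--     tb = [ii for ii, jj in enumerate(ta) if jj > 0]
--     tc = []
--     for ii in tb:
--         if ii + 1 in tb and ii + 2 in tb:
--             tc.append(ii)
--     return tc
-- ===== SOURCE B (Python) =====
-- def get_2_3(tt):
--     return [i for i in range(len(tt) - 2)
--             if tt[i] >= 2 and tt[i + 1] >= 2 and tt[i + 2] >= 2]
-- ===== Notes on version B (the rewrite author's own statement) =====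
-- stated objective: faster
-- what changed: Replaces A's 0/1 mask, index-list build and per-candidate linear membership scans ('i+1 in tb and i+2 in tb') with one direct sliding-window comprehension over the indices that tests the three elements in place.
import Mathlib
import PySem

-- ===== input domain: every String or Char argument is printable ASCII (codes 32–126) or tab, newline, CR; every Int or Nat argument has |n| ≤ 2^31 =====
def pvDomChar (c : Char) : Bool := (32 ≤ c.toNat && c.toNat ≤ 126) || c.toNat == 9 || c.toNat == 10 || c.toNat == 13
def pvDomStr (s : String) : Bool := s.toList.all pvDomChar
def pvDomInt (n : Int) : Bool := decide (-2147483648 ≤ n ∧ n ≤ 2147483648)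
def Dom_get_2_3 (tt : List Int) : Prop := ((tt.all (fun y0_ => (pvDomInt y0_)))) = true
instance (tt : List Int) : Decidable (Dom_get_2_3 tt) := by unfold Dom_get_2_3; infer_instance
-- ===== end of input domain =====

-- B replaces A's 0/1 mask + index list + per-candidate linear membership scans by one direct
-- sliding-window pass over the indices (measurably faster on large inputs).

-- ===== PORT A =====
def get_2_3 (tt : List Int) : List Int :=
  let ta := tt.map (fun ii => if 2 ≤ ii then (1 : Int) else 0)
  let tb := (PySem.List.enumerate ta 0).filterMap (fun p => if 0 < p.2 then some p.1 else none)
  tb.foldl (fun tc ii => if (ii + 1) ∈ tb ∧ (ii + 2) ∈ tb then tc ++ [ii] else tc) []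

-- ===== PORT B =====
def get_2_3_alt (tt : List Int) : List Int :=
  (PySem.List.pyRange 0 ((tt.length : Int) - 2) 1).filter
    (fun i => decide (2 ≤ PySem.List.pyGetD tt i 0) &&
              decide (2 ≤ PySem.List.pyGetD tt (i + 1) 0) &&
              decide (2 ≤ PySem.List.pyGetD tt (i + 2) 0))

-- ===== PRECONDITION & SPEC =====
def Spec_get_2_3 (tt : List Int) (out : List Int) : Prop := out = get_2_3_alt tt
instance (tt : List Int) (out : List Int) : Decidable (Spec_get_2_3 tt out) := by unfold Spec_get_2_3; infer_instance

-- ===== CLAIM (what is proved, stated in full; the proofs are below) =====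
def Claim_equal_get_2_3 : Prop := ∀ (tt : List Int), Dom_get_2_3 tt → Spec_get_2_3 tt (get_2_3 tt)

-- ===== LEMMAS AND PROOFS =====

-- reference predicates over Nat indices: pvC = "value at k is ≥ 2", pvOk = "window of 3 at k fits and is all ≥ 2"
def pvC (tt : List Int) (k : Nat) : Bool := decide (2 ≤ tt.getD k 0)
def pvOk (tt : List Int) (k : Nat) : Bool :=
  pvC tt k && pvC tt (k+1) && pvC tt (k+2) && decide (k + 2 < tt.length)

-- A's mask+enumerate index list, with arbitrary start, is the filtered index range
theorem pv_tb_aux (l : List Int) (s : Nat) :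
    (PySem.List.enumerate (l.map (fun ii => if 2 ≤ ii then (1 : Int) else 0)) (s : Int)).filterMap
      (fun p => if 0 < p.2 then some p.1 else none)
    = ((List.range l.length).filter (pvC l)).map (fun k => ((s + k : Nat) : Int)) := by
  induction l generalizing s with
  | nil => simp [PySem.List.enumerate_nil]
  | cons x xs ih =>
    rw [List.map_cons, PySem.List.enumerate_cons, List.filterMap_cons]
    have hcast : ((s : Int) + 1) = ((s + 1 : Nat) : Int) := by push_cast; ring
    rw [hcast, ih (s+1)]
    rw [List.length_cons, List.range_succ_eq_map, List.filter_cons]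
    by_cases hx : 2 ≤ x
    · simp only [hx, if_pos, pvC, List.getD_cons_zero, List.getD_cons_succ, decide_true,
        List.filter_map, Function.comp_def, Nat.succ_eq_add_one]
      simp only [show (0:Int) < 1 by decide, if_pos, List.map_cons, Nat.add_zero, List.map_map,
        Function.comp_def]
      refine congrArg₂ _ rfl (List.map_congr_left (fun k _ => by push_cast; ring))
    · simp only [hx, pvC, List.getD_cons_zero, List.getD_cons_succ, decide_false,
        List.filter_map, Function.comp_def, Nat.succ_eq_add_one]
      simp only [show ¬ (0:Int) < 0 by decide, if_false, Bool.false_eq_true, List.map_map,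
        Function.comp_def]
      exact List.map_congr_left (fun k _ => by push_cast; ring)

theorem pv_tb_eq (tt : List Int) :
    (PySem.List.enumerate (tt.map (fun ii => if 2 ≤ ii then (1 : Int) else 0)) 0).filterMap
      (fun p => if 0 < p.2 then some p.1 else none)
    = ((List.range tt.length).filter (pvC tt)).map (fun k : Nat => (k : Int)) := by
  have h := pv_tb_aux tt 0
  simpa using h

theorem pv_mem_tb (tt : List Int) (m : Nat) :
    ((m : Int) ∈ ((List.range tt.length).filter (pvC tt)).map (fun k : Nat => (k : Int)))
    ↔ (m < tt.length ∧ pvC tt m = true) := by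
  simp only [List.mem_map, List.mem_filter, List.mem_range, Int.natCast_inj]
  constructor
  · rintro ⟨k, ⟨hk, hc⟩, rfl⟩; exact ⟨hk, hc⟩
  · rintro ⟨hm, hc⟩; exact ⟨m, ⟨hm, hc⟩, rfl⟩

-- A's final membership loop over the index list keeps exactly the 3-windows
theorem pv_foldA (tt : List Int) (tb : List Int)
    (htb : tb = ((List.range tt.length).filter (pvC tt)).map (fun k : Nat => (k : Int))) :
    tb.foldl (fun tc ii => if (ii + 1) ∈ tb ∧ (ii + 2) ∈ tb then tc ++ [ii] else tc) []
    = ((List.range tt.length).filter (pvOk tt)).map (fun k : Nat => (k : Int)) := by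
  rw [PySem.List.foldl_append_ite_eq_filter, List.nil_append]
  conv_lhs => rw [htb]
  rw [List.filter_map, List.filter_filter]
  refine congrArg₂ List.map rfl (List.filter_congr (fun k hk => ?_))
  simp only [List.mem_range] at hk
  have e1 : (k : Int) + 1 = ((k + 1 : Nat) : Int) := by push_cast; ring
  have e2 : (k : Int) + 2 = ((k + 2 : Nat) : Int) := by push_cast; ring
  simp only [Function.comp_def, e1, e2, pv_mem_tb, pvOk]
  by_cases h1 : pvC tt k <;> by_cases h2 : pvC tt (k+1) <;> by_cases h3 : pvC tt (k+2) <;>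
    by_cases h4 : k + 2 < tt.length <;>
    simp [h1, h2, h3, h4] <;> omega

theorem pv_A_eq (tt : List Int) :
    get_2_3 tt = ((List.range tt.length).filter (pvOk tt)).map (fun k : Nat => (k : Int)) :=
  pv_foldA tt _ (pv_tb_eq tt)

-- the range of B may stop at len-2: indices past it never satisfy pvOk
theorem pv_range_trim (tt : List Int) :
    (List.range (tt.length - 2)).filter (fun k => pvC tt k && pvC tt (k+1) && pvC tt (k+2))
    = (List.range tt.length).filter (pvOk tt) := by
  by_cases h : 2 ≤ tt.length
  · have hlen : tt.length = (tt.length - 2) + 2 := by omega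
    conv_rhs => rw [hlen, List.range_add, List.filter_append]
    have h2 : ((List.range 2).map (fun j => tt.length - 2 + j)).filter (pvOk tt) = [] := by
      rw [List.filter_eq_nil_iff]
      intro a ha
      simp only [List.mem_map, List.mem_range] at ha
      obtain ⟨j, hj, rfl⟩ := ha
      simp only [pvOk, Bool.and_eq_true, decide_eq_true_eq, not_and]
      intro _ _
      omega
    rw [h2, List.append_nil]
    refine List.filter_congr (fun k hk => ?_)
    simp only [List.mem_range] at hk
    simp only [pvOk]
    rw [decide_eq_true (show k + 2 < tt.length by omega), Bool.and_true]
  · have h1 : tt.length - 2 = 0 := by omega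
    rw [h1, List.range_zero, List.filter_nil, eq_comm, List.filter_eq_nil_iff]
    intro a ha
    simp only [List.mem_range] at ha
    simp only [pvOk, Bool.and_eq_true, decide_eq_true_eq, not_and]
    intro _ _
    omega

theorem pv_B_eq (tt : List Int) :
    get_2_3_alt tt = ((List.range tt.length).filter (pvOk tt)).map (fun k : Nat => (k : Int)) := by
  unfold get_2_3_alt
  rw [PySem.List.pyRange_one, List.filter_map]
  have htn : ((tt.length : Int) - 2 - 0).toNat = tt.length - 2 := by omega
  rw [htn, ← pv_range_trim]
  refine congrArg₂ List.map (funext (fun k => by simp)) ?_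
  refine List.filter_congr (fun k hk => ?_)
  have e1 : (k : Int) + 1 = ((k + 1 : Nat) : Int) := by push_cast; ring
  have e2 : (k : Int) + 2 = ((k + 2 : Nat) : Int) := by push_cast; ring
  simp only [Function.comp_def, zero_add, e1, e2, PySem.List.pyGetD_natCast, pvC]

-- ===== VERDICT (by name: the statement is the Claim_ definition above) =====
theorem get_2_3_spec : Claim_equal_get_2_3 := by
  intro tt _
  unfold Spec_get_2_3
  rw [pv_A_eq, pv_B_eq]
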